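-- pv_equiv track=rewrite | github.com/miliar/Code_Jam_Webscraper | solutions_python/Problem_201/2161.py | solve
-- ===== SOURCE A (Python) =====
-- from collections import Counter
--
-- def solve(n, k) :
-- 	queue = Counter([n])
-- 	mx = n
-- 	last = None
-- 	for _ in range(k) :
-- 		queue.update([mx//2, max((mx-1)//2, 0)])
-- 		last = [mx//2, max((mx-1)//2, 0)]
-- 		queue[mx] -= 1
-- 		if queue[mx] == 0 :
-- 			queue.pop(mx)
-- 			mx = max(queue)
-- 	fst_min = min(queue) ; queue[fst_min] -= 1
-- 	if queue[fst_min] == 0 :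
-- 		queue.pop(fst_min)
-- 	return ' '.join(map(str, last))
-- ===== SOURCE B (Python) =====
-- def solve(n, k):
--     # Batch simulation: process all segments of the current largest size at once.
--     cnt = {n: 1}
--     while True:
--         s = max(cnt)
--         c = cnt.pop(s)
--         if k <= c:
--             return ' '.join(map(str, [s // 2, max((s - 1) // 2, 0)]))
--         k -= c
--         a, b = s // 2, max((s - 1) // 2, 0)
--         cnt[a] = cnt.get(a, 0) + c
--         cnt[b] = cnt.get(b, 0) + c
-- ===== Notes on version B (the rewrite author's own statement) =====
-- stated objective: faster
-- what changed: A simulates the k persons one at a time on a Counter (k iterations, each rescanning for the max when a count empties); B batches every round: it takes the current largest segment size s with multiplicity c and either answers (k <= c) or splits all c segments at once, so the number of rounds is logarithmic instead of k.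
-- intended difference: For n = -1 and k >= 2, A keeps splitting the stale size -1 forever (its cached max is never refreshed because that count never reaches zero) and returns '-1 0', while B splits the true current largest segment, size 0, and returns '0 0', the intended always-split-the-largest behaviour. — e.g. on solve(-1, 2): A returns "-1 0", B returns "0 0"
import Mathlib
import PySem

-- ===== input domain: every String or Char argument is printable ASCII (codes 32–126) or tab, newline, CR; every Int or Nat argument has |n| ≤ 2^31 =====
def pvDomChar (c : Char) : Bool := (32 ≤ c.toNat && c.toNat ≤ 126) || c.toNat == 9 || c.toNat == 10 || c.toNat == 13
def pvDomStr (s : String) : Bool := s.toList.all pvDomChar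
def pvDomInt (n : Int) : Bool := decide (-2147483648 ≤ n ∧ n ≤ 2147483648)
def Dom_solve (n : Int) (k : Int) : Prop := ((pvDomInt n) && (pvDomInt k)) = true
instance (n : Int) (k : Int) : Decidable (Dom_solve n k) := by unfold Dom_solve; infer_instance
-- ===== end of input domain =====

-- B batches each round of the greedy split (all segments of the current largest size at once)
-- instead of A's person-by-person Counter simulation; return-value equivalence is proved outside
-- D_solve (n = -1 with k ≥ 2, where A splits a stale cached max). A's trailing min-block only
-- mutates its local queue and is ported but dead for the return value.


-- ===== PORT A =====
-- one iteration of A's 'for _ in range(k)' loop; state = (queue, mx, last)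
def solveBody (st : PySem.Dict Int Int × Int × Option (Int × Int)) :
    PySem.Dict Int Int × Int × Option (Int × Int) :=
  let q := st.1
  let mx := st.2.1
  let a := PySem.Int.floordiv mx 2
  let b := max (PySem.Int.floordiv (mx - 1) 2) 0
  -- queue.update([mx//2, max((mx-1)//2, 0)]) : Counter.update adds 1 per list element
  let q := (q.modify a 0 (· + 1)).modify b 0 (· + 1)
  let last : Option (Int × Int) := some (a, b)
  -- queue[mx] -= 1
  let q := q.modify mx 0 (· - 1)
  if q.getD mx 0 == 0 then
    let q := q.erase mx
    -- mx = max(queue); queue is never empty here, so max's ValueError is unreachable (.getD mx)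
    (q, (PySem.List.max? q.keys (fun x => x)).getD mx, last)
  else
    (q, mx, last)

def solve (n : Int) (k : Int) : String :=
  let queue := PySem.Dict.counter [n]
  let st := (List.range k.toNat).foldl (fun s _ => solveBody s) (queue, n, (none : Option (Int × Int)))
  let q := st.1
  -- fst_min = min(queue); queue[fst_min] -= 1; pop if 0 — mutates only the local queue (dead for the
  -- return value); queue is never empty here, so min's ValueError is unreachable (.getD 0)
  let fm := (PySem.List.min? q.keys (fun x => x)).getD 0
  let q2 := q.modify fm 0 (· - 1)
  let _q3 := if q2.getD fm 0 == 0 then q2.erase fm else q2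
  match st.2.2 with
  | some p => PySem.Str.join " " [PySem.Int.toStr p.1, PySem.Int.toStr p.2]
  | none => ""  -- k ≤ 0: last is None and ' '.join(map(str, None)) raises TypeError (outside Pre_solve)

-- ===== PORT B =====
-- B's 'while True' loop; each round consumes at least 1 of k, so fuel = k.toNat + 1 never runs out
-- on the states solve_alt builds (the 0-fuel branch is a totality guard only)
def solveAltGo : Nat → PySem.Dict Int Int → Int → String
  | 0, _, _ => ""
  | fuel + 1, cnt, k =>
    let s := (PySem.List.max? cnt.keys (fun x => x)).getD 0   -- s = max(cnt); never empty here
    match cnt.pop? s with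
    | none => ""   -- unreachable: s is a key of cnt
    | some (c, cnt1) =>
      if k ≤ c then
        PySem.Str.join " " [PySem.Int.toStr (PySem.Int.floordiv s 2),
                            PySem.Int.toStr (max (PySem.Int.floordiv (s - 1) 2) 0)]
      else
        let a := PySem.Int.floordiv s 2
        let b := max (PySem.Int.floordiv (s - 1) 2) 0
        let cnt2 := cnt1.insert a (cnt1.getD a 0 + c)
        let cnt3 := cnt2.insert b (cnt2.getD b 0 + c)
        solveAltGo fuel cnt3 (k - c)

def solve_alt (n : Int) (k : Int) : String :=
  solveAltGo (k.toNat + 1) ((PySem.Dict.empty : PySem.Dict Int Int).insert n 1) k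

-- ===== PRECONDITION & SPEC =====
-- Pre_solve excludes exactly k ≤ 0, where A raises TypeError (' '.join over None)
def Pre_solve (n : Int) (k : Int) : Prop := 1 ≤ k
instance (n : Int) (k : Int) : Decidable (Pre_solve n k) := by unfold Pre_solve; infer_instance
def pvWitness_solve : Int × Int := (6, 3)

-- For n = -1 and k ≥ 2, A keeps splitting the stale size -1 (its cached max is never refreshed,
-- because that count never reaches zero) and returns "-1 0", while B splits the true current
-- largest segment, size 0, and returns "0 0", the intended always-split-the-largest behaviour.
def D_solve (n : Int) (k : Int) : Prop := n = -1 ∧ 2 ≤ k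
instance (n : Int) (k : Int) : Decidable (D_solve n k) := by unfold D_solve; infer_instance
def Spec_solve (n : Int) (k : Int) (out : String) : Prop := ¬ D_solve n k → out = solve_alt n k
instance (n : Int) (k : Int) (out : String) : Decidable (Spec_solve n k out) := by
  unfold Spec_solve; infer_instance
def pvDiffWitness_solve : Int × Int := (-1, 2)
def pvDiffWitnessOut_solve : String × String := ("-1 0", "0 0")

-- ===== CLAIM (what is proved, stated in full; the proofs are below) =====
def Claim_unchanged_solve : Prop :=
  ∀ (n : Int) (k : Int), Dom_solve n k → Pre_solve n k → Spec_solve n k (solve n k)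
def Claim_changed_solve : Prop :=
  Dom_solve (pvDiffWitness_solve.1) (pvDiffWitness_solve.2) ∧
  Pre_solve (pvDiffWitness_solve.1) (pvDiffWitness_solve.2) ∧
  D_solve (pvDiffWitness_solve.1) (pvDiffWitness_solve.2) ∧
  solve (pvDiffWitness_solve.1) (pvDiffWitness_solve.2) = pvDiffWitnessOut_solve.1 ∧
  solve_alt (pvDiffWitness_solve.1) (pvDiffWitness_solve.2) = pvDiffWitnessOut_solve.2 ∧
  pvDiffWitnessOut_solve.1 ≠ pvDiffWitnessOut_solve.2
def Claim_exact_solve : Prop :=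
  ∀ (n : Int) (k : Int), Dom_solve n k → Pre_solve n k → D_solve n k → solve n k ≠ solve_alt n k


-- ===== LEMMAS AND PROOFS =====

-- A's loop, its output, and abstract views of the dictionaries
def loopA (j : Nat) (st : PySem.Dict Int Int × Int × Option (Int × Int)) :
    PySem.Dict Int Int × Int × Option (Int × Int) :=
  (List.range j).foldl (fun s _ => solveBody s) st

def outA (st : PySem.Dict Int Int × Int × Option (Int × Int)) : String :=
  match st.2.2 with
  | some p => PySem.Str.join " " [PySem.Int.toStr p.1, PySem.Int.toStr p.2]
  | none => ""

lemma solve_eq (n k : Int) :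
    solve n k = outA (loopA k.toNat (PySem.Dict.counter [n], n, (none : Option (Int × Int)))) := rfl

lemma solve_alt_eq (n k : Int) :
    solve_alt n k = solveAltGo (k.toNat + 1) ((PySem.Dict.empty : PySem.Dict Int Int).insert n 1) k := rfl

lemma loopA_succ (j : Nat) (st : PySem.Dict Int Int × Int × Option (Int × Int)) :
    loopA (j + 1) st = solveBody (loopA j st) := by
  simp [loopA, List.range_succ]

lemma loopA_add (i j : Nat) (st : PySem.Dict Int Int × Int × Option (Int × Int)) :
    loopA (i + j) st = loopA j (loopA i st) := by
  induction j with
  | zero => rfl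
  | succ j ih => rw [← Nat.add_assoc, loopA_succ, loopA_succ, ih]

-- a dict seen as its count function (keys = support, all lookups via getD _ 0)
def SuppD (q : PySem.Dict Int Int) (f : Int → Int) : Prop :=
  q.keys.Nodup ∧ (∀ x, q.getD x 0 = f x) ∧ (∀ x, x ∈ q.keys ↔ f x ≠ 0)

def MaxS (f : Int → Int) (m : Int) : Prop := f m ≠ 0 ∧ ∀ x, f x ≠ 0 → x ≤ m

def iA (mx : Int) : Int := PySem.Int.floordiv mx 2
def iB (mx : Int) : Int := max (PySem.Int.floordiv (mx - 1) 2) 0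

-- counts after one / j splitting steps of a segment of size m into parts a and b
def stepF (f : Int → Int) (a b m : Int) : Int → Int := fun x =>
  f x + (if x = a then 1 else 0) + (if x = b then 1 else 0) - (if x = m then 1 else 0)

def levF (f : Int → Int) (a b m : Int) (j : Nat) : Int → Int := fun x =>
  f x + (j : Int) * ((if x = a then 1 else 0) + (if x = b then 1 else 0) - (if x = m then 1 else 0))

-- B's counter after one batching round (definitionally the dict solveAltGo recurses on)
def bNext (qB : PySem.Dict Int Int) (a b m c : Int) : PySem.Dict Int Int :=
  ((qB.erase m).insert a ((qB.erase m).getD a 0 + c)).insert b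
    (((qB.erase m).insert a ((qB.erase m).getD a 0 + c)).getD b 0 + c)

lemma levF_zero (f : Int → Int) (a b m : Int) : levF f a b m 0 = f := by
  funext x; simp [levF]

lemma levF_succ (f : Int → Int) (a b m : Int) (j : Nat) :
    levF f a b m (j + 1) = stepF (levF f a b m j) a b m := by
  funext x; simp only [levF, stepF]; push_cast; ring

lemma iA_eq (mx : Int) : iA mx = mx / 2 := by
  unfold iA; rw [PySem.Int.floordiv_eq_ediv_of_pos (by norm_num)]

lemma iB_eq (mx : Int) : iB mx = max ((mx - 1) / 2) 0 := by
  unfold iB; rw [PySem.Int.floordiv_eq_ediv_of_pos (by norm_num)]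

lemma iB_nonneg (mx : Int) : 0 ≤ iB mx := le_max_right _ _

lemma iA_ne (mx : Int) (h : mx ≠ -1) (h0 : mx ≠ 0) : iA mx ≠ mx := by
  rw [iA_eq]; omega

lemma iB_ne (mx : Int) (h : mx ≠ -1) (h0 : mx ≠ 0) : iB mx ≠ mx := by
  rw [iB_eq, Int.max_def]; split <;> omega

lemma iA_zero : iA 0 = 0 := by decide
lemma iB_zero : iB 0 = 0 := by decide
lemma iA_neg_one : iA (-1) = -1 := by decide
lemma iB_neg_one : iB (-1) = 0 := by decide

-- SuppD transport lemmas
lemma SuppD_ext (q : PySem.Dict Int Int) (f g : Int → Int) (h : SuppD q f)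
    (hfg : ∀ x, f x = g x) : SuppD q g := by
  obtain ⟨h1, h2, h3⟩ := h
  exact ⟨h1, fun x => (h2 x).trans (hfg x), fun x => (h3 x).trans (by rw [hfg x])⟩

lemma SuppD_modify (q : PySem.Dict Int Int) (f : Int → Int) (y : Int) (g : Int → Int)
    (h : SuppD q f) (hnz : g (f y) ≠ 0) :
    SuppD (q.modify y 0 g) (fun x => if x = y then g (f y) else f x) := by
  obtain ⟨h1, h2, h3⟩ := h
  refine ⟨?_, ?_, ?_⟩
  · rw [PySem.Dict.keys_modify]
    exact PySem.Dict.nodup_keys_insert _ _ _ h1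
  · intro x
    rw [PySem.Dict.getD_modify, h2 y]
    by_cases hx : x = y <;> simp [hx, h2 x]
  · intro x
    have hk : (q.modify y 0 g).keys = (q.insert y (g (q.getD y 0))).keys :=
      PySem.Dict.keys_modify _ _ _ _
    rw [hk, PySem.Dict.mem_keys_insert]
    by_cases hx : x = y
    · simp [hx, hnz]
    · simp [hx, h3 x]

lemma SuppD_insert (q : PySem.Dict Int Int) (f : Int → Int) (y v : Int)
    (h : SuppD q f) (hv : v ≠ 0) :
    SuppD (q.insert y v) (fun x => if x = y then v else f x) := by
  obtain ⟨h1, h2, h3⟩ := h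
  refine ⟨PySem.Dict.nodup_keys_insert _ _ _ h1, ?_, ?_⟩
  · intro x
    rw [PySem.Dict.getD_insert]
    by_cases hx : x = y <;> simp [hx, h2 x]
  · intro x
    rw [PySem.Dict.mem_keys_insert]
    by_cases hx : x = y
    · simp [hx, hv]
    · simp [hx, h3 x]

lemma get?_mk_filter (l : List (Int × Int)) (y x : Int) :
    (PySem.Dict.mk (l.filter (fun p => !(p.1 == y)))).get? x =
      if x = y then none else (PySem.Dict.mk l).get? x := by
  induction l with
  | nil =>
    have hnil : (PySem.Dict.mk ([] : List (Int × Int))).get? x = none := rfl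
    simp [List.filter_nil, hnil]
  | cons p t ih =>
    obtain ⟨pk, pv⟩ := p
    by_cases hpk : pk = y
    · subst hpk
      have hfc : List.filter (fun p => !(p.1 == pk)) ((pk, pv) :: t) =
          List.filter (fun p => !(p.1 == pk)) t := by
        simp [List.filter_cons]
      rw [hfc, ih, PySem.Dict.get?_mk_cons]
      by_cases hx : x = pk
      · simp [hx]
      · simp [hx, show (pk == x) = false from beq_eq_false_iff_ne.mpr (Ne.symm hx)]
    · have hfc : List.filter (fun p => !(p.1 == y)) ((pk, pv) :: t) =
          (pk, pv) :: List.filter (fun p => !(p.1 == y)) t := by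
        simp [List.filter_cons, hpk]
      rw [hfc, PySem.Dict.get?_mk_cons, PySem.Dict.get?_mk_cons, ih]
      by_cases hpx : pk = x
      · subst hpx
        simp [hpk]
      · simp [show (pk == x) = false from beq_eq_false_iff_ne.mpr hpx]

lemma get?_erase' (d : PySem.Dict Int Int) (y x : Int) :
    (d.erase y).get? x = if x = y then none else d.get? x := by
  obtain ⟨l⟩ := d
  exact get?_mk_filter l y x

lemma keys_erase' (d : PySem.Dict Int Int) (y : Int) :
    (d.erase y).keys = d.keys.filter (fun x => !(x == y)) := by
  obtain ⟨l⟩ := d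
  show List.map Prod.fst (List.filter (fun p => !(p.1 == y)) l) =
    List.filter (fun x => !(x == y)) (List.map Prod.fst l)
  rw [List.filter_map]
  rfl

lemma SuppD_erase (q : PySem.Dict Int Int) (f : Int → Int) (y : Int) (h : SuppD q f) :
    SuppD (q.erase y) (fun x => if x = y then 0 else f x) := by
  obtain ⟨h1, h2, h3⟩ := h
  refine ⟨?_, ?_, ?_⟩
  · rw [keys_erase']; exact h1.filter _
  · intro x
    rw [PySem.Dict.getD_eq_get?_getD, get?_erase']
    by_cases hx : x = y
    · simp [hx]
    · simp only [if_neg hx]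
      rw [← PySem.Dict.getD_eq_get?_getD]
      simp [hx, h2 x]
  · intro x
    rw [keys_erase', List.mem_filter]
    by_cases hx : x = y <;> simp [hx, h3 x]

lemma SuppD_get? (q : PySem.Dict Int Int) (f : Int → Int) (x : Int)
    (h : SuppD q f) (hx : f x ≠ 0) : q.get? x = some (f x) := by
  obtain ⟨h1, h2, h3⟩ := h
  have hmem : x ∈ q.keys := (h3 x).mpr hx
  cases hq : q.get? x with
  | none => exact absurd ((PySem.Dict.get?_eq_none_iff_not_mem_keys q x).mp hq) (by simp [hmem])
  | some v =>
    have hv := h2 x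
    rw [PySem.Dict.getD_eq_get?_getD, hq] at hv
    simp only [Option.getD_some] at hv
    rw [hv]

lemma SuppD_max (q : PySem.Dict Int Int) (f : Int → Int) (m : Int)
    (h : SuppD q f) (hm : MaxS f m) :
    PySem.List.max? q.keys (fun x => x) = some m := by
  obtain ⟨h1, h2, h3⟩ := h
  obtain ⟨hm0, hmax⟩ := hm
  have hmem : m ∈ q.keys := (h3 m).mpr hm0
  cases hq : PySem.List.max? q.keys (fun x => x) with
  | none =>
    rw [PySem.List.max?_eq_none_iff] at hq
    simp [hq] at hmem
  | some m' =>
    have h4 : m' ∈ q.keys := PySem.List.max?_mem hq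
    have h5 : m' ≤ m := hmax m' ((h3 m').mp h4)
    have h6 : m ≤ m' := PySem.List.max?_isMax hq m hmem
    exact congrArg some (by omega)

lemma SuppD_modify_erase (q : PySem.Dict Int Int) (f : Int → Int) (y : Int) (g : Int → Int)
    (h : SuppD q f) :
    SuppD ((q.modify y 0 g).erase y) (fun x => if x = y then 0 else f x) := by
  obtain ⟨h1, h2, h3⟩ := h
  refine ⟨?_, ?_, ?_⟩
  · rw [keys_erase', PySem.Dict.keys_modify]
    exact (PySem.Dict.nodup_keys_insert _ _ _ h1).filter _
  · intro x
    rw [PySem.Dict.getD_eq_get?_getD, get?_erase']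
    by_cases hx : x = y
    · simp [hx]
    · simp only [if_neg hx]
      rw [show q.modify y 0 g = q.insert y (g (q.getD y 0)) from rfl,
        PySem.Dict.get?_insert_of_ne _ _ hx, ← PySem.Dict.getD_eq_get?_getD]
      simp [hx, h2 x]
  · intro x
    rw [keys_erase', List.mem_filter, PySem.Dict.keys_modify]
    by_cases hx : x = y <;> simp [hx, PySem.Dict.mem_keys_insert, h3 x]

lemma iA_def (mx : Int) : PySem.Int.floordiv mx 2 = iA mx := rfl
lemma iB_def (mx : Int) : max (PySem.Int.floordiv (mx - 1) 2) 0 = iB mx := rfl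

-- the first two Counter updates of one loop iteration of A, seen on count functions
lemma SuppD_modify2 (q : PySem.Dict Int Int) (f : Int → Int) (a b : Int)
    (h : SuppD q f) (hnn : ∀ x, 0 ≤ f x) :
    SuppD ((q.modify a 0 (· + 1)).modify b 0 (· + 1))
      (fun x => f x + (if x = a then 1 else 0) + (if x = b then 1 else 0)) := by
  have h1 := hnn a
  have h2 := hnn b
  have s1 := SuppD_modify q f a (· + 1) h (by beta_reduce; omega)
  have s2 := SuppD_modify _ _ b (· + 1) s1
    (by beta_reduce; split_ifs <;> subst_vars <;> omega)
  refine SuppD_ext _ _ _ s2 ?_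
  intro x
  beta_reduce
  split_ifs <;> subst_vars <;> omega

-- the count of m after the three updates of one loop iteration of A
lemma getD_modify3 (q : PySem.Dict Int Int) (f : Int → Int) (a b m : Int) (h : SuppD q f)
    (hnn : ∀ x, 0 ≤ f x) :
    (((q.modify a 0 (· + 1)).modify b 0 (· + 1)).modify m 0 (· - 1)).getD m 0 =
      stepF f a b m m := by
  have s2 := SuppD_modify2 q f a b h hnn
  rw [PySem.Dict.getD_modify, if_pos rfl, s2.2.1 m]
  simp only [stepF]
  split_ifs <;> subst_vars <;> omega

lemma stepF_self (f : Int → Int) (a b m : Int) :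
    stepF f a b m m = f m + (if m = a then 1 else 0) + (if m = b then 1 else 0) - 1 := by
  simp [stepF]

lemma stepF_split (f : Int → Int) (a b m : Int) (x : Int) :
    (if x = m then f m + (if m = a then 1 else 0) + (if m = b then 1 else 0) - 1
      else f x + (if x = a then 1 else 0) + (if x = b then 1 else 0)) = stepF f a b m x := by
  simp only [stepF]
  split_ifs <;> subst_vars <;> omega

lemma stepF_split0 (f : Int → Int) (a b m : Int) (ha : a ≠ m) (hb : b ≠ m) (hfm : f m = 1)
    (x : Int) :
    (if x = m then 0 else f x + (if x = a then 1 else 0) + (if x = b then 1 else 0)) =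
      stepF f a b m x := by
  simp only [stepF]
  split_ifs <;> subst_vars <;> omega

lemma stepF_b_ne (f : Int → Int) (a b m : Int) (hb : b ≠ m) (hnnb : 0 ≤ f b) (hnna : 0 ≤ f a) :
    stepF f a b m b ≠ 0 := by
  simp only [stepF]
  split_ifs <;> subst_vars <;> omega

-- one loop iteration of A, no key removal (the decremented count stays nonzero)
lemma stepA_noerase (q : PySem.Dict Int Int) (f : Int → Int) (mx : Int) (l : Option (Int × Int))
    (h : SuppD q f) (hnn : ∀ x, 0 ≤ f x) (hne : stepF f (iA mx) (iB mx) mx mx ≠ 0) :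
    ∃ q', solveBody (q, mx, l) = (q', mx, some (iA mx, iB mx)) ∧
      SuppD q' (stepF f (iA mx) (iB mx) mx) := by
  have s2 := SuppD_modify2 q f (iA mx) (iB mx) h hnn
  have s3 := SuppD_modify _ _ mx (· - 1) s2
    (by beta_reduce; rw [stepF_self] at hne; omega)
  refine ⟨((q.modify (iA mx) 0 (· + 1)).modify (iB mx) 0 (· + 1)).modify mx 0 (· - 1), ?_, ?_⟩
  · show solveBody (q, mx, l) = _
    simp only [solveBody]
    simp only [iB_def]
    simp only [iA_def]
    rw [getD_modify3 q f (iA mx) (iB mx) mx h hnn]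
    simp [hne]
  · refine SuppD_ext _ _ _ s3 ?_
    intro x
    beta_reduce
    exact stepF_split f (iA mx) (iB mx) mx x

-- one loop iteration of A that exhausts mx: the key is erased and mx is recomputed
lemma stepA_erase (q : PySem.Dict Int Int) (f : Int → Int) (mx : Int) (l : Option (Int × Int))
    (h : SuppD q f) (hnn : ∀ x, 0 ≤ f x) (ha : iA mx ≠ mx) (hb : iB mx ≠ mx) (hc : f mx = 1) :
    ∃ q' mx', solveBody (q, mx, l) = (q', mx', some (iA mx, iB mx)) ∧
      SuppD q' (stepF f (iA mx) (iB mx) mx) ∧ MaxS (stepF f (iA mx) (iB mx) mx) mx' ∧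
      0 ≤ mx' := by
  have hz : stepF f (iA mx) (iB mx) mx mx = 0 := by
    rw [stepF_self, if_neg (fun hh => ha hh.symm), if_neg (fun hh => hb hh.symm)]
    omega
  have s2 := SuppD_modify2 q f (iA mx) (iB mx) h hnn
  have s4 : SuppD ((((q.modify (iA mx) 0 (· + 1)).modify (iB mx) 0 (· + 1)).modify mx 0
      (· - 1)).erase mx) (stepF f (iA mx) (iB mx) mx) := by
    refine SuppD_ext _ _ _ (SuppD_modify_erase _ _ mx (· - 1) s2) ?_
    intro x
    beta_reduce
    exact stepF_split0 _ (iA mx) (iB mx) mx ha hb hc x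
  have hbmem : stepF f (iA mx) (iB mx) mx (iB mx) ≠ 0 :=
    stepF_b_ne f (iA mx) (iB mx) mx hb (hnn (iB mx)) (hnn (iA mx))
  cases hq : PySem.List.max?
      (((((q.modify (iA mx) 0 (· + 1)).modify (iB mx) 0 (· + 1)).modify mx 0
        (· - 1)).erase mx)).keys (fun x => x) with
  | none =>
    rw [PySem.List.max?_eq_none_iff] at hq
    have := (s4.2.2 (iB mx)).mpr hbmem
    simp [hq] at this
  | some m' =>
    have hmem' := PySem.List.max?_mem hq
    have hmax' := PySem.List.max?_isMax hq
    refine ⟨_, m', ?_, s4, ⟨(s4.2.2 m').mp hmem', fun x hx => hmax' x ((s4.2.2 x).mpr hx)⟩, ?_⟩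
    · show solveBody (q, mx, l) = _
      simp only [solveBody]
      simp only [iB_def]
      simp only [iA_def]
      rw [getD_modify3 q f (iA mx) (iB mx) mx h hnn, hz]
      simp only [BEq.rfl, if_true]
      rw [hq]
      rfl
    · have h5 := hmax' (iB mx) ((s4.2.2 (iB mx)).mpr hbmem)
      have h6 := iB_nonneg mx
      simp only at h5
      omega

-- counts stay nonnegative along one level of A's loop
lemma levF_nonneg (f : Int → Int) (a b m : Int) (j : Nat) (hnn : ∀ x, 0 ≤ f x)
    (hc : 1 ≤ f m)
    (hcase : ((a ≠ m ∧ b ≠ m) ∧ (j : Int) ≤ f m) ∨ a = m) :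
    ∀ x, 0 ≤ levF f a b m j x := by
  intro x
  have h4 := hnn x
  have h5 := hnn m
  have h6 := hnn b
  rcases hcase with ⟨⟨ha, hb⟩, hj⟩ | h0
  · simp only [levF]; split_ifs <;> subst_vars <;> (try ring_nf) <;> omega
  · subst h0
    simp only [levF]; split_ifs <;> subst_vars <;> (try ring_nf) <;> omega

-- the count of m stays nonzero before the level is exhausted
lemma stepF_levF_m (f : Int → Int) (a b m : Int) (j : Nat) (hc : 1 ≤ f m)
    (hcase : ((a ≠ m ∧ b ≠ m) ∧ ((j : Int) + 1) < f m) ∨ a = m) :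
    stepF (levF f a b m j) a b m m ≠ 0 := by
  simp only [stepF, levF]
  rcases hcase with ⟨⟨ha, hb⟩, hj⟩ | h0
  · split_ifs <;> subst_vars <;> (try ring_nf) <;> omega
  · subst h0
    split_ifs <;> subst_vars <;> (try ring_nf) <;> omega

-- the split parts along one level never collide with m unless m splits into itself
lemma levelA (q : PySem.Dict Int Int) (f : Int → Int) (mx : Int) (l : Option (Int × Int)) (j : Nat)
    (hor : ((iA mx ≠ mx ∧ iB mx ≠ mx) ∧ (j : Int) < f mx) ∨ iA mx = mx)
    (hc : 1 ≤ f mx) (h : SuppD q f) (hnn : ∀ x, 0 ≤ f x) :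
    ∃ q' l', loopA j (q, mx, l) = (q', mx, l') ∧ SuppD q' (levF f (iA mx) (iB mx) mx j) ∧
      (1 ≤ j → l' = some (iA mx, iB mx)) := by
  induction j with
  | zero =>
    exact ⟨q, l, rfl, by rw [levF_zero]; exact h, by intro hh; exact absurd hh (by decide)⟩
  | succ j ih =>
    have hor' : ((iA mx ≠ mx ∧ iB mx ≠ mx) ∧ (j : Int) < f mx) ∨ iA mx = mx := by
      rcases hor with ⟨hab, hj⟩ | h0
      · exact Or.inl ⟨hab, by push_cast at hj ⊢; omega⟩
      · exact Or.inr h0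
    obtain ⟨q', l', heq, hs, _⟩ := ih hor'
    have hnnj : ∀ x, 0 ≤ levF f (iA mx) (iB mx) mx j x := by
      apply levF_nonneg f (iA mx) (iB mx) mx j hnn hc
      rcases hor with ⟨hab, hj⟩ | h0
      · exact Or.inl ⟨hab, by push_cast at hj ⊢; omega⟩
      · exact Or.inr h0
    have hne : stepF (levF f (iA mx) (iB mx) mx j) (iA mx) (iB mx) mx mx ≠ 0 := by
      apply stepF_levF_m f (iA mx) (iB mx) mx j hc
      rcases hor with ⟨hab, hj⟩ | h0
      · exact Or.inl ⟨hab, by push_cast at hj ⊢; omega⟩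
      · exact Or.inr h0
    obtain ⟨q'', heq2, hs2⟩ := stepA_noerase q' (levF f (iA mx) (iB mx) mx j) mx l' hs hnnj hne
    refine ⟨q'', some (iA mx, iB mx), ?_, ?_, fun _ => rfl⟩
    · rw [loopA_succ, heq, heq2]
    · rw [levF_succ]; exact hs2

-- a full level of A ((f mx) iterations) when the split parts are strictly new sizes
lemma levelA_full (q : PySem.Dict Int Int) (f : Int → Int) (mx : Int) (l : Option (Int × Int))
    (ha : iA mx ≠ mx) (hb : iB mx ≠ mx) (hc : 1 ≤ f mx) (h : SuppD q f) (hnn : ∀ x, 0 ≤ f x) :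
    ∃ q' mx', loopA (f mx).toNat (q, mx, l) = (q', mx', some (iA mx, iB mx)) ∧
      SuppD q' (levF f (iA mx) (iB mx) mx (f mx).toNat) ∧
      MaxS (levF f (iA mx) (iB mx) mx (f mx).toNat) mx' ∧ 0 ≤ mx' := by
  obtain ⟨c1, hc1⟩ : ∃ c1 : Nat, (f mx).toNat = c1 + 1 := ⟨(f mx).toNat - 1, by omega⟩
  rw [hc1, loopA_succ]
  obtain ⟨q', l', heq, hs, _⟩ := levelA q f mx l c1 (Or.inl ⟨⟨ha, hb⟩, by omega⟩) hc h hnn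
  have hnn1 : ∀ x, 0 ≤ levF f (iA mx) (iB mx) mx c1 x :=
    levF_nonneg f (iA mx) (iB mx) mx c1 hnn hc (Or.inl ⟨⟨ha, hb⟩, by omega⟩)
  have hfmx : levF f (iA mx) (iB mx) mx c1 mx = 1 := by
    simp only [levF]
    split_ifs <;> subst_vars <;> (try ring_nf) <;> omega
  obtain ⟨q4, mx', heq4, hs4, hm4, hge4⟩ :=
    stepA_erase q' (levF f (iA mx) (iB mx) mx c1) mx l' hs hnn1 ha hb hfmx
  rw [heq, heq4]
  refine ⟨q4, mx', rfl, ?_, ?_, hge4⟩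
  · rw [levF_succ]; exact hs4
  · rw [levF_succ]; exact hm4

-- B's counter after one batching round carries the same count function as A after the full level
lemma SuppD_B_next (qB : PySem.Dict Int Int) (f : Int → Int) (a b m : Int)
    (h : SuppD qB f) (hnn : ∀ x, 0 ≤ f x) (hc : 1 ≤ f m)
    (hcase : (a ≠ m ∧ b ≠ m) ∨ (a = m ∧ b = m)) :
    SuppD (bNext qB a b m (f m)) (levF f a b m (f m).toNat) := by
  have e1 := SuppD_erase qB f m h
  have hv1 : (qB.erase m).getD a 0 = if a = m then 0 else f a := e1.2.1 a
  have h1 := hnn a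
  have h2 := hnn b
  have i1 := SuppD_insert _ _ a ((qB.erase m).getD a 0 + f m) e1
    (by rw [hv1]; split_ifs <;> subst_vars <;> omega)
  have hv2 := i1.2.1 b
  beta_reduce at hv2
  have i2 := SuppD_insert _ _ b
    (((qB.erase m).insert a ((qB.erase m).getD a 0 + f m)).getD b 0 + f m) i1
    (by rw [hv2, hv1]; split_ifs <;> subst_vars <;> omega)
  refine SuppD_ext _ _ _ i2 ?_
  intro x
  beta_reduce
  rw [hv2, hv1]
  have htn : ((f m).toNat : Int) = f m := Int.toNat_of_nonneg (by omega)
  simp only [levF, htn]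
  rcases hcase with ⟨ha, hb⟩ | ⟨ha, hb⟩ <;> split_ifs <;> subst_vars <;> (try ring_nf) <;> omega

-- the main simulation lemma: A's k-step loop and B's batched recursion agree
lemma main_sim : ∀ (K : Nat) (k : Int) (qA qB : PySem.Dict Int Int) (mx : Int)
    (l : Option (Int × Int)) (fuel : Nat) (f : Int → Int),
    k.toNat ≤ K → 1 ≤ k → k.toNat < fuel → SuppD qA f → SuppD qB f → (∀ x, 0 ≤ f x) →
    MaxS f mx → mx ≠ -1 →
    outA (loopA k.toNat (qA, mx, l)) = solveAltGo fuel qB k := by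
  intro K
  induction K with
  | zero => intro k _ _ _ _ _ _ hK hk _ _ _ _ _ _; omega
  | succ K ih =>
    intro k qA qB mx l fuel f hK hk hfuel hA hB hnn hmax hmx
    obtain ⟨fl, rfl⟩ : ∃ fl, fuel = fl + 1 := ⟨fuel - 1, by omega⟩
    have hc : 1 ≤ f mx := by have := hnn mx; have := hmax.1; omega
    have hs : (PySem.List.max? qB.keys (fun x => x)).getD 0 = mx := by
      rw [SuppD_max qB f mx hB hmax]; rfl
    have hpop : qB.pop? mx = some (f mx, qB.erase mx) := by
      simp [PySem.Dict.pop?, SuppD_get? qB f mx hB hmax.1]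
    have hgo : solveAltGo (fl + 1) qB k =
        if k ≤ f mx then
          PySem.Str.join " " [PySem.Int.toStr (iA mx), PySem.Int.toStr (iB mx)]
        else solveAltGo fl (bNext qB (iA mx) (iB mx) mx (f mx)) (k - f mx) := by
      simp only [solveAltGo, hs, hpop, bNext, iA, iB]
    rw [hgo]
    have hab : (iA mx ≠ mx ∧ iB mx ≠ mx) ∨ mx = 0 := by
      by_cases h0 : mx = 0
      · exact Or.inr h0
      · exact Or.inl ⟨iA_ne mx hmx h0, iB_ne mx hmx h0⟩
    by_cases hkc : k ≤ f mx
    · rw [if_pos hkc]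
      have hlast : (loopA k.toNat (qA, mx, l)).2.2 = some (iA mx, iB mx) := by
        by_cases hfull : k.toNat = (f mx).toNat ∧ mx ≠ 0
        · obtain ⟨hfe, h0⟩ := hfull
          rcases hab with ⟨ha, hb⟩ | h0'
          · obtain ⟨q', mx', heq, _, _, _⟩ := levelA_full qA f mx l ha hb hc hA hnn
            rw [hfe, heq]
          · exact absurd h0' h0
        · have hor : ((iA mx ≠ mx ∧ iB mx ≠ mx) ∧ (k.toNat : Int) < f mx) ∨ iA mx = mx := by
            rcases hab with ⟨ha, hb⟩ | h0
            · left
              refine ⟨⟨ha, hb⟩, ?_⟩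
              have : k.toNat ≠ (f mx).toNat := fun hh => hfull ⟨hh, fun h0 => ha (h0 ▸ iA_zero)⟩
              omega
            · right; rw [h0]; exact iA_zero
          obtain ⟨q', l', heq, _, hl⟩ := levelA qA f mx l k.toNat hor hc hA hnn
          rw [heq]
          exact hl (by omega)
      simp only [outA, hlast]
    · rw [if_neg hkc]
      have hsplit : k.toNat = (f mx).toNat + (k - f mx).toNat := by omega
      rw [hsplit, loopA_add]
      rcases hab with ⟨ha, hb⟩ | h0
      · have hBn := SuppD_B_next qB f (iA mx) (iB mx) mx hB hnn hc (Or.inl ⟨ha, hb⟩)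
        obtain ⟨q', mx', heq, hs', hm', hge'⟩ := levelA_full qA f mx l ha hb hc hA hnn
        rw [heq]
        exact ih (k - f mx) q' (bNext qB (iA mx) (iB mx) mx (f mx)) mx'
          (some (iA mx, iB mx)) fl (levF f (iA mx) (iB mx) mx (f mx).toNat)
          (by omega) (by omega) (by omega) hs' hBn
          (levF_nonneg f (iA mx) (iB mx) mx (f mx).toNat hnn hc (Or.inl ⟨⟨ha, hb⟩, by omega⟩))
          hm' (by omega)
      · subst h0
        have hBn := SuppD_B_next qB f (iA 0) (iB 0) 0 hB hnn hc
          (Or.inr ⟨iA_zero, iB_zero⟩)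
        obtain ⟨q', l', heq, hs', _⟩ := levelA qA f 0 l (f 0).toNat
          (Or.inr iA_zero) hc hA hnn
        rw [heq]
        have htn : ((f 0).toNat : Int) = f 0 := Int.toNat_of_nonneg (by omega)
        have hm0 : MaxS (levF f (iA 0) (iB 0) 0 (f 0).toNat) 0 := by
          constructor
          · simp only [levF, htn, iA_zero, iB_zero]
            split_ifs <;> (try ring_nf) <;> omega
          · intro x hx
            by_cases e : x = 0
            · omega
            · apply hmax.2
              simp only [levF, iA_zero, iB_zero, if_neg e] at hx
              omega
        exact ih (k - f 0) q' (bNext qB (iA 0) (iB 0) 0 (f 0)) 0 l' fl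
          (levF f (iA 0) (iB 0) 0 (f 0).toNat)
          (by omega) (by omega) (by omega) hs' hBn
          (levF_nonneg f (iA 0) (iB 0) 0 (f 0).toNat hnn hc (Or.inr iA_zero))
          hm0 (by omega)

lemma single_SuppD_counter (n : Int) :
    SuppD (PySem.Dict.counter [n]) (fun x => if x = n then 1 else 0) := by
  refine ⟨?_, ?_, ?_⟩
  · rw [PySem.Dict.keys_counter]
    exact PySem.Set.nodup_ofList [n]
  · intro x
    rw [PySem.Dict.getD_counter]
    by_cases hx : x = n <;> simp [hx, List.count_cons] <;> omega
  · intro x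
    rw [PySem.Dict.keys_counter]
    by_cases hx : x = n <;> simp [hx, PySem.Set.mem_ofList]

lemma single_SuppD_insert (n : Int) :
    SuppD ((PySem.Dict.empty : PySem.Dict Int Int).insert n 1) (fun x => if x = n then 1 else 0) := by
  refine ⟨?_, ?_, ?_⟩
  · exact PySem.Dict.nodup_keys_insert _ _ _ PySem.Dict.nodup_keys_empty
  · intro x
    rw [PySem.Dict.getD_insert]
    by_cases hx : x = n <;> simp [hx, PySem.Dict.getD_empty]
  · intro x
    rw [PySem.Dict.mem_keys_insert]
    by_cases hx : x = n <;> simp [hx, PySem.Dict.keys_empty]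

-- A on n = -1 answers "-1 0" for every k ≥ 1 (the stale-max behaviour)
lemma solveA_neg_one (k : Int) (hk : 1 ≤ k) : solve (-1) k = "-1 0" := by
  rw [solve_eq]
  obtain ⟨q', l', heq, _, hl⟩ := levelA (PySem.Dict.counter [-1])
    (fun x => if x = -1 then 1 else 0) (-1) none k.toNat
    (Or.inr iA_neg_one) (by simp)
    (single_SuppD_counter (-1)) (by intro x; by_cases hx : x = -1 <;> simp [hx])
  rw [heq, hl (by omega)]
  simp only [outA, iA_neg_one, iB_neg_one]
  decide

-- B on the state {-1: 1, 0: c} with current max 0 answers "0 0"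
lemma altGo_diag : ∀ (fl : Nat) (c k : Int), 1 ≤ c → 1 ≤ k → k.toNat < fl →
    solveAltGo fl (PySem.Dict.mk [(-1, 1), (0, c)]) k = "0 0" := by
  intro fl
  induction fl with
  | zero => intro c k _ hk hfl; omega
  | succ fl ih =>
    intro c k hc hk hfl
    have hmax : (PySem.List.max? ((PySem.Dict.mk [(-1, 1), (0, c)] : PySem.Dict Int Int)).keys
        (fun x => x)).getD 0 = 0 := by
      rw [show ((PySem.Dict.mk [(-1, 1), (0, c)] : PySem.Dict Int Int)).keys = [-1, 0] from rfl]
      decide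
    have hpop : (PySem.Dict.mk [(-1, 1), (0, c)] : PySem.Dict Int Int).pop? 0 =
        some (c, PySem.Dict.mk [(-1, 1)]) := by
      simp [PySem.Dict.pop?, PySem.Dict.get?_mk_cons, PySem.Dict.erase, List.filter]
    simp only [solveAltGo, hmax, hpop]
    by_cases hkc : k ≤ c
    · rw [if_pos hkc]
      decide
    · rw [if_neg hkc]
      have ea : PySem.Int.floordiv 0 2 = 0 := by decide
      have eb : max (PySem.Int.floordiv (0 - 1) 2) 0 = 0 := by decide
      simp only [ea, eb]
      have h1 : (PySem.Dict.mk [(-1, 1)] : PySem.Dict Int Int).insert 0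
          ((PySem.Dict.mk [(-1, 1)] : PySem.Dict Int Int).getD 0 0 + c) =
          PySem.Dict.mk [(-1, 1), (0, c)] := by
        rw [show ((PySem.Dict.mk [(-1, 1)] : PySem.Dict Int Int)).getD 0 0 = 0 from by decide,
          zero_add]
        apply PySem.Dict.ext
        rw [PySem.Dict.items_insert_of_not_contains _ _ (by decide)]
        rfl
      rw [h1]
      have hg : (PySem.Dict.mk [(-1, 1), (0, c)] : PySem.Dict Int Int).getD 0 0 = c := by
        rw [PySem.Dict.getD_eq_get?_getD]
        rw [PySem.Dict.get?_mk_cons, PySem.Dict.get?_mk_cons]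
        norm_num
      have hcont : (PySem.Dict.mk [(-1, 1), (0, c)] : PySem.Dict Int Int).contains 0 = true := by
        rw [PySem.Dict.contains_eq_decide_mem_keys,
          show ((PySem.Dict.mk [(-1, 1), (0, c)] : PySem.Dict Int Int)).keys = [-1, 0] from rfl]
        decide
      have h2 : (PySem.Dict.mk [(-1, 1), (0, c)] : PySem.Dict Int Int).insert 0
          ((PySem.Dict.mk [(-1, 1), (0, c)] : PySem.Dict Int Int).getD 0 0 + c) =
          PySem.Dict.mk [(-1, 1), (0, c + c)] := by
        rw [hg]
        apply PySem.Dict.ext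
        rw [PySem.Dict.items_insert_of_contains _ _ hcont]
        show List.map _ [((-1 : Int), (1 : Int)), (0, c)] = [((-1 : Int), (1 : Int)), (0, c + c)]
        simp [show ((-1 : Int) == 0) = false from by decide]
      rw [h2]
      exact ih (c + c) (k - c) (by omega) (by omega) (by omega)

lemma solveB_neg_one (k : Int) (hk : 2 ≤ k) : solve_alt (-1) k = "0 0" := by
  rw [solve_alt_eq]
  have he : ((PySem.Dict.empty : PySem.Dict Int Int).insert (-1) 1) = PySem.Dict.mk [(-1, 1)] := by
    apply PySem.Dict.ext
    rw [PySem.Dict.items_insert_of_not_contains _ _ (by decide)]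
    rfl
  rw [he]
  have hmax : (PySem.List.max? ((PySem.Dict.mk [(-1, 1)] : PySem.Dict Int Int)).keys
      (fun x => x)).getD 0 = -1 := by decide
  have hpop : (PySem.Dict.mk [(-1, 1)] : PySem.Dict Int Int).pop? (-1) =
      some (1, PySem.Dict.mk []) := by decide
  simp only [solveAltGo, hmax, hpop]
  rw [if_neg (by omega : ¬ k ≤ 1)]
  have ea : PySem.Int.floordiv (-1) 2 = -1 := by decide
  have eb : max (PySem.Int.floordiv (-1 - 1) 2) 0 = 0 := by decide
  simp only [ea, eb]
  have h1 : (PySem.Dict.mk [] : PySem.Dict Int Int).insert (-1)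
      ((PySem.Dict.mk [] : PySem.Dict Int Int).getD (-1) 0 + 1) = PySem.Dict.mk [(-1, 1)] := by
    apply PySem.Dict.ext
    rw [PySem.Dict.items_insert_of_not_contains _ _ (by decide)]
    rfl
  rw [h1]
  have h2 : (PySem.Dict.mk [(-1, 1)] : PySem.Dict Int Int).insert 0
      ((PySem.Dict.mk [(-1, 1)] : PySem.Dict Int Int).getD 0 0 + 1) =
      PySem.Dict.mk [(-1, 1), (0, 1)] := by
    apply PySem.Dict.ext
    rw [PySem.Dict.items_insert_of_not_contains _ _ (by decide)]
    rw [show ((PySem.Dict.mk [(-1, 1)] : PySem.Dict Int Int)).getD 0 0 = 0 from by decide]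
    rfl
  rw [h2]
  exact altGo_diag k.toNat 1 (k - 1) (by omega) (by omega) (by omega)

-- ===== VERDICT =====
theorem solve_spec : Claim_unchanged_solve := by
  unfold Claim_unchanged_solve Spec_solve
  intro n k _ hpre hD
  unfold Pre_solve at hpre
  unfold D_solve at hD
  by_cases hn : n = -1
  · have hk1 : k = 1 := by omega
    subst hn; subst hk1; decide
  · rw [solve_eq, solve_alt_eq]
    apply main_sim k.toNat k _ _ n none (k.toNat + 1) (fun x => if x = n then 1 else 0)
      le_rfl hpre (by omega) (single_SuppD_counter n) (single_SuppD_insert n) ?_ ?_ hn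
    · intro x
      by_cases e : x = n <;> simp [e]
    · refine ⟨by simp, fun x hx => ?_⟩
      by_cases e : x = n
      · exact le_of_eq e
      · simp [e] at hx

theorem solve_changed : Claim_changed_solve := by
  unfold Claim_changed_solve; decide

theorem solve_tight : Claim_exact_solve := by
  intro n k _ hpre hD
  obtain ⟨hn, hk⟩ := hD
  subst hn
  rw [solveA_neg_one k (by exact le_trans (by norm_num) hk), solveB_neg_one k hk]
  decide
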